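-- pv_equiv track=rewrite | github.com/gurudev108/algorithms | python/DCP924-Easy-SmallestWindow-Sorted.py | find_unsorted_window
-- ===== SOURCE A (Python) =====
-- def find_unsorted_window(arr):
--     n = len(arr)
--     if n <= 1:
--         return (0, 0)  # A single element array or empty array is trivially sorted
--
--     # Step 1: Find the initial left boundary
--     left = 0
--     while left < n - 1 and arr[left] <= arr[left + 1]:
--         left += 1
--
--     if left == n - 1:
--         # The array is already sorted
--         return (0, 0)
--
--     # Step 2: Find the initial right boundary
--     right = n - 1
--     while right > 0 and arr[right] >= arr[right - 1]:
--         right -= 1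
--
--     # Step 3: Find the min and max within the window (left to right)
--     sub_min = min(arr[left:right + 1])
--     sub_max = max(arr[left:right + 1])
--
--     # Step 4: Expand the left boundary if needed
--     while left > 0 and arr[left - 1] > sub_min:
--         left -= 1
--
--     # Step 5: Expand the right boundary if needed
--     while right < n - 1 and arr[right + 1] < sub_max:
--         right += 1
--
--     return (left, right)
-- ===== SOURCE B (Python) =====
-- def find_unsorted_window(arr):
--     s = sorted(arr)
--     mismatches = [i for i, (x, y) in enumerate(zip(arr, s)) if x != y]
--     if not mismatches:
--         return (0, 0)
--     return (mismatches[0], mismatches[-1])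
-- ===== Notes on version B (the rewrite author's own statement) =====
-- stated objective: simpler
-- what changed: Replaces the two boundary scans, the window min/max pass and the two expansion loops by a single sort of a copy followed by a scan for the first and last index where the array differs from its sorted copy.
import Mathlib
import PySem

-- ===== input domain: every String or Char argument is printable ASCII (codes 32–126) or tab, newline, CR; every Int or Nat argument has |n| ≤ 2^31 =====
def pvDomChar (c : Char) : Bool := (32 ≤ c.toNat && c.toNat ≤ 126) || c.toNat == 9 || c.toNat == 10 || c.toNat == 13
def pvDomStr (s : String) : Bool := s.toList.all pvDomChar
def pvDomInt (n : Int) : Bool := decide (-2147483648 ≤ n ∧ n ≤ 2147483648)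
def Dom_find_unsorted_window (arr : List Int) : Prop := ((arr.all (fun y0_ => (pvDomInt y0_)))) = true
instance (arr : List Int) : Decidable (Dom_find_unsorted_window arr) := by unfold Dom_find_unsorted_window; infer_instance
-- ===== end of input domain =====

-- B replaces A's boundary scans, window min/max pass and expansion loops by one sorted copy
-- plus a first/last-mismatch comparison scan (simpler; not claimed faster).

-- ===== PORT A =====
-- Step 1 loop: while left < n - 1 and arr[left] <= arr[left + 1]: left += 1
def pvScanLeft (arr : List Int) (left : Nat) : Nat :=
  if _h : left < arr.length - 1 ∧ arr.getD left 0 ≤ arr.getD (left + 1) 0 then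
    pvScanLeft arr (left + 1)
  else left
termination_by arr.length - 1 - left
decreasing_by omega

-- Step 2 loop: while right > 0 and arr[right] >= arr[right - 1]: right -= 1
def pvScanRight (arr : List Int) (right : Nat) : Nat :=
  if _h : 0 < right ∧ arr.getD (right - 1) 0 ≤ arr.getD right 0 then
    pvScanRight arr (right - 1)
  else right
termination_by right

-- Step 4 loop: while left > 0 and arr[left - 1] > sub_min: left -= 1
def pvExpandLeft (arr : List Int) (subMin : Int) (left : Nat) : Nat :=
  if _h : 0 < left ∧ subMin < arr.getD (left - 1) 0 then
    pvExpandLeft arr subMin (left - 1)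
  else left
termination_by left

-- Step 5 loop: while right < n - 1 and arr[right + 1] < sub_max: right += 1
def pvExpandRight (arr : List Int) (subMax : Int) (right : Nat) : Nat :=
  if _h : right < arr.length - 1 ∧ arr.getD (right + 1) 0 < subMax then
    pvExpandRight arr subMax (right + 1)
  else right
termination_by arr.length - 1 - right
decreasing_by omega

-- min(...)/max(...) of the window: the window is provably nonempty whenever this branch runs
-- (left < n-1 and left < right), so Python never raises here; .getD 0 is never the value used.
def find_unsorted_window (arr : List Int) : Int × Int :=
  let n := arr.length
  if n ≤ 1 then (0, 0)
  else
    let left := pvScanLeft arr 0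
    if left = n - 1 then (0, 0)
    else
      let right := pvScanRight arr (n - 1)
      let window := PySem.List.slice arr (some (left : Int)) (some ((right : Int) + 1))
      let subMin := (PySem.List.min? window (fun x => x)).getD 0
      let subMax := (PySem.List.max? window (fun x => x)).getD 0
      let left' := pvExpandLeft arr subMin left
      let right' := pvExpandRight arr subMax right
      ((left' : Int), (right' : Int))

-- ===== PORT B =====
def find_unsorted_window_alt (arr : List Int) : Int × Int :=
  let s := PySem.List.sorted arr (fun x => x) false
  let mismatches :=
    ((PySem.List.enumerate (arr.zip s) 0).filter (fun p => p.2.1 != p.2.2)).map (fun p => p.1)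
  match mismatches with
  | [] => (0, 0)
  | i :: rest => (i, (i :: rest).getLast (by simp))

-- ===== PRECONDITION & SPEC =====
def Spec_find_unsorted_window (arr : List Int) (out : Int × Int) : Prop := out = find_unsorted_window_alt arr
instance (arr : List Int) (out : Int × Int) : Decidable (Spec_find_unsorted_window arr out) := by unfold Spec_find_unsorted_window; infer_instance

-- ===== CLAIM (what is proved, stated in full; the proofs are below) =====
def Claim_equal_find_unsorted_window : Prop := ∀ (arr : List Int), Dom_find_unsorted_window arr → Spec_find_unsorted_window arr (find_unsorted_window arr)

-- ===== LEMMAS AND PROOFS =====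
theorem scanLeft_le (arr : List Int) (l : Nat) (hl : l ≤ arr.length - 1) :
    pvScanLeft arr l ≤ arr.length - 1 := by
  fun_induction pvScanLeft with
  | case1 l h ih => exact ih (by omega)
  | case2 l h => exact hl

theorem scanLeft_chain (arr : List Int) (l : Nat) :
    ∀ k, l ≤ k → k < pvScanLeft arr l → arr.getD k 0 ≤ arr.getD (k+1) 0 := by
  fun_induction pvScanLeft with
  | case1 l h ih =>
      intro k hk1 hk2
      rcases Nat.eq_or_lt_of_le hk1 with rfl | h2
      · exact h.2
      · exact ih k h2 hk2
  | case2 l h => intro k hk1 hk2; omega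

theorem scanLeft_stop (arr : List Int) (l : Nat)
    (h : pvScanLeft arr l < arr.length - 1) :
    ¬ arr.getD (pvScanLeft arr l) 0 ≤ arr.getD (pvScanLeft arr l + 1) 0 := by
  fun_induction pvScanLeft with
  | case1 l hh ih => exact ih h
  | case2 l hh => intro hc; exact hh ⟨h, hc⟩

theorem scanRight_le (arr : List Int) (r : Nat) : pvScanRight arr r ≤ r := by
  fun_induction pvScanRight with
  | case1 r h ih => omega
  | case2 r h => omega

theorem scanRight_chain (arr : List Int) (r : Nat) :
    ∀ k, pvScanRight arr r ≤ k → k < r → arr.getD k 0 ≤ arr.getD (k+1) 0 := by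
  fun_induction pvScanRight with
  | case1 r h ih =>
      intro k hk1 hk2
      rcases Nat.lt_or_ge k (r-1) with h2 | h2
      · exact ih k hk1 h2
      · have : k = r - 1 := by omega
        subst this
        have : r - 1 + 1 = r := by omega
        rw [this]; exact h.2
  | case2 r h => intro k hk1 hk2; omega

theorem scanRight_stop (arr : List Int) (r : Nat)
    (h : 0 < pvScanRight arr r) :
    ¬ arr.getD (pvScanRight arr r - 1) 0 ≤ arr.getD (pvScanRight arr r) 0 := by
  fun_induction pvScanRight with
  | case1 r hh ih => exact ih h
  | case2 r hh => intro hc; exact hh ⟨h, hc⟩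

theorem expandLeft_le (arr : List Int) (m : Int) (l : Nat) : pvExpandLeft arr m l ≤ l := by
  fun_induction pvExpandLeft with
  | case1 l h ih => omega
  | case2 l h => omega

theorem expandLeft_strict (arr : List Int) (m : Int) (l : Nat) :
    ∀ k, pvExpandLeft arr m l ≤ k → k < l → m < arr.getD k 0 := by
  fun_induction pvExpandLeft with
  | case1 l h ih =>
      intro k hk1 hk2
      rcases Nat.lt_or_ge k (l-1) with h2 | h2
      · exact ih k hk1 h2
      · have : k = l - 1 := by omega
        subst this; exact h.2
  | case2 l h => intro k hk1 hk2; omega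

theorem expandLeft_stop (arr : List Int) (m : Int) (l : Nat)
    (h : 0 < pvExpandLeft arr m l) :
    arr.getD (pvExpandLeft arr m l - 1) 0 ≤ m := by
  fun_induction pvExpandLeft with
  | case1 l hh ih => exact ih h
  | case2 l hh =>
      by_contra hc
      exact hh ⟨h, by omega⟩

theorem expandRight_ge (arr : List Int) (M : Int) (r : Nat) : r ≤ pvExpandRight arr M r := by
  fun_induction pvExpandRight with
  | case1 r h ih => omega
  | case2 r h => omega

theorem expandRight_le (arr : List Int) (M : Int) (r : Nat) (hr : r ≤ arr.length - 1) :
    pvExpandRight arr M r ≤ arr.length - 1 := by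
  fun_induction pvExpandRight with
  | case1 r h ih => exact ih (by omega)
  | case2 r h => exact hr

theorem expandRight_strict (arr : List Int) (M : Int) (r : Nat) :
    ∀ k, r < k → k ≤ pvExpandRight arr M r → arr.getD k 0 < M := by
  fun_induction pvExpandRight with
  | case1 r h ih =>
      intro k hk1 hk2
      rcases Nat.lt_or_ge (r+1) k with h2 | h2
      · exact ih k h2 hk2
      · have : k = r + 1 := by omega
        subst this; exact h.2
  | case2 r h => intro k hk1 hk2; omega

theorem expandRight_stop (arr : List Int) (M : Int) (r : Nat)
    (h : pvExpandRight arr M r < arr.length - 1) :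
    M ≤ arr.getD (pvExpandRight arr M r + 1) 0 := by
  fun_induction pvExpandRight with
  | case1 r hh ih => exact ih h
  | case2 r hh => by_contra hc; exact hh ⟨h, by omega⟩

theorem mono_of_chain (f : Nat → Int) (a b : Nat)
    (hc : ∀ k, a ≤ k → k < b → f k ≤ f (k+1)) :
    ∀ i j, a ≤ i → i ≤ j → j ≤ b → f i ≤ f j := by
  intro i j hai hij hjb
  induction j with
  | zero =>
      have : i = 0 := by omega
      rw [this]
  | succ j ih =>
      rcases Nat.eq_or_lt_of_le hij with rfl | hlt
      · exact le_refl _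
      · exact le_trans (ih (by omega) (by omega)) (hc j (by omega) (by omega))
-- membership in the window slice

theorem mem_window_iff (arr : List Int) (L R : Nat) (hR : R < arr.length) (x : Int) :
    x ∈ PySem.List.slice arr (some (L : Int)) (some ((R : Int) + 1)) ↔
      ∃ k, L ≤ k ∧ k ≤ R ∧ x = arr.getD k 0 := by
  have hcast : ((R : Int) + 1) = ((R + 1 : Nat) : Int) := by push_cast; ring
  rw [hcast, PySem.List.slice_natCast]
  constructor
  · intro hx
    rw [List.mem_iff_getElem] at hx
    obtain ⟨i, hi, hx⟩ := hx
    have hlt : i < R + 1 - L := by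
      have := List.length_take_le (R + 1 - L) (arr.drop L)
      have h2 : i < min (R + 1 - L) (arr.drop L).length := by simpa using hi
      omega
    have hiL : L + i < arr.length := by
      have h2 : i < min (R + 1 - L) (arr.drop L).length := by simpa using hi
      have := List.length_drop (l := arr) (i := L)
      omega
    refine ⟨L + i, by omega, by omega, ?_⟩
    rw [List.getElem_take, List.getElem_drop] at hx
    rw [List.getD_eq_getElem _ _ hiL, ← hx]
  · rintro ⟨k, hk1, hk2, rfl⟩
    rw [List.mem_iff_getElem]
    have hklen : k < arr.length := by omega
    refine ⟨k - L, ?_, ?_⟩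
    · simp only [List.length_take, List.length_drop]
      omega
    · rw [List.getElem_take, List.getElem_drop, List.getD_eq_getElem _ _ hklen]
      congr 1
      omega

-- s.drop k ~ arr.drop k from the permutation and equal prefixes

theorem drop_perm_of_take_eq (arr s : List Int) (hperm : s.Perm arr) (k : Nat)
    (h : arr.take k = s.take k) : (s.drop k).Perm (arr.drop k) := by
  have hp : (s.take k ++ s.drop k).Perm (arr.take k ++ arr.drop k) := by
    rw [List.take_append_drop, List.take_append_drop]; exact hperm
  rw [h] at hp
  exact (List.perm_append_left_iff _).mp hp

theorem take_perm_of_drop_eq (arr s : List Int) (hperm : s.Perm arr) (k : Nat)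
    (h : arr.drop k = s.drop k) : (s.take k).Perm (arr.take k) := by
  have hp : (s.take k ++ s.drop k).Perm (arr.take k ++ arr.drop k) := by
    rw [List.take_append_drop, List.take_append_drop]; exact hperm
  rw [h] at hp
  exact (List.perm_append_right_iff _).mp hp

theorem mem_drop_iff' (l : List Int) (k : Nat) (x : Int) :
    x ∈ l.drop k ↔ ∃ j, k ≤ j ∧ j < l.length ∧ x = l.getD j 0 := by
  rw [List.mem_iff_getElem]
  constructor
  · rintro ⟨i, hi, rfl⟩
    have hlen : k + i < l.length := by
      have := List.length_drop (l := l) (i := k); omega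
    exact ⟨k + i, by omega, hlen, by rw [List.getElem_drop, List.getD_eq_getElem _ _ hlen]⟩
  · rintro ⟨j, hk, hj, rfl⟩
    refine ⟨j - k, by simp; omega, ?_⟩
    rw [List.getElem_drop, List.getD_eq_getElem _ _ hj]
    congr 1; omega

theorem mem_take_iff' (l : List Int) (k : Nat) (x : Int) :
    x ∈ l.take k ↔ ∃ j, j < k ∧ j < l.length ∧ x = l.getD j 0 := by
  rw [List.mem_iff_getElem]
  constructor
  · rintro ⟨i, hi, rfl⟩
    have h2 : i < min k l.length := by simpa using hi
    have hlen : i < l.length := by omega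
    exact ⟨i, by omega, hlen, by rw [List.getElem_take, List.getD_eq_getElem _ _ hlen]⟩
  · rintro ⟨j, hk, hj, rfl⟩
    refine ⟨j, by simp; omega, ?_⟩
    rw [List.getElem_take, List.getD_eq_getElem _ _ hj]

theorem pairwise_getD_le (s : List Int) (hpair : s.Pairwise (· ≤ ·)) (i j : Nat)
    (hij : i ≤ j) (hj : j < s.length) : s.getD i 0 ≤ s.getD j 0 := by
  rcases Nat.eq_or_lt_of_le hij with rfl | hlt
  · exact le_refl _
  · rw [List.getD_eq_getElem _ _ (by omega), List.getD_eq_getElem _ _ hj]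
    exact List.pairwise_iff_getElem.mp hpair i j (by omega) hj hlt

theorem prefix_take_eq (arr s : List Int) (hperm : s.Perm arr) (hpair : s.Pairwise (· ≤ ·))
    (i0 : Nat)
    (hbound : ∀ k j, k < i0 → k ≤ j → j < arr.length → arr.getD k 0 ≤ arr.getD j 0) :
    ∀ k, k ≤ i0 → k ≤ arr.length → arr.take k = s.take k := by
  have hslen : s.length = arr.length := hperm.length_eq
  intro k
  induction k with
  | zero => intro _ _; simp
  | succ k ih =>
      intro hk1 hk2
      have htk : arr.take k = s.take k := ih (by omega) (by omega)
      have hklen : k < arr.length := by omega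
      have hd : (s.drop k).Perm (arr.drop k) := drop_perm_of_take_eq arr s hperm k htk
      have hak : arr.getD k 0 ∈ arr.drop k :=
        (mem_drop_iff' _ _ _).mpr ⟨k, le_refl _, hklen, rfl⟩
      have hsk : s.getD k 0 ∈ s.drop k :=
        (mem_drop_iff' _ _ _).mpr ⟨k, le_refl _, by omega, rfl⟩
      have a_min : ∀ x ∈ arr.drop k, arr.getD k 0 ≤ x := by
        intro x hx
        obtain ⟨j, hkj, hjlen, rfl⟩ := (mem_drop_iff' _ _ _).mp hx
        exact hbound k j (by omega) hkj hjlen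
      have s_min : ∀ x ∈ s.drop k, s.getD k 0 ≤ x := by
        intro x hx
        obtain ⟨j, hkj, hjlen, rfl⟩ := (mem_drop_iff' _ _ _).mp hx
        exact pairwise_getD_le s hpair k j hkj hjlen
      have heq : arr.getD k 0 = s.getD k 0 :=
        le_antisymm (a_min _ (hd.mem_iff.mp hsk)) (s_min _ (hd.symm.mem_iff.mp hak))
      have hge : arr[k] = s[k]'(by omega) := by
        rw [← List.getD_eq_getElem arr 0 hklen, ← List.getD_eq_getElem s 0 (by omega)]
        exact heq
      rw [List.take_add_one, List.take_add_one, htk]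
      congr 1
      rw [List.getElem?_eq_getElem hklen, List.getElem?_eq_getElem (by omega : k < s.length), hge]

theorem s_lt_at (arr s : List Int) (hperm : s.Perm arr) (hpair : s.Pairwise (· ≤ ·))
    (i0 : Nat) (hpref : arr.take i0 = s.take i0) (_hi0 : i0 < arr.length)
    (hwit : ∃ j, i0 < j ∧ j < arr.length ∧ arr.getD j 0 < arr.getD i0 0) :
    s.getD i0 0 < arr.getD i0 0 := by
  have hslen : s.length = arr.length := hperm.length_eq
  obtain ⟨j, hij, hjlen, hjlt⟩ := hwit
  have hd : (s.drop i0).Perm (arr.drop i0) := drop_perm_of_take_eq arr s hperm i0 hpref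
  have hw : arr.getD j 0 ∈ s.drop i0 :=
    hd.symm.mem_iff.mp ((mem_drop_iff' _ _ _).mpr ⟨j, by omega, hjlen, rfl⟩)
  have : s.getD i0 0 ≤ arr.getD j 0 := by
    obtain ⟨t, ht1, ht2, heq⟩ := (mem_drop_iff' _ _ _).mp hw
    rw [heq]
    exact pairwise_getD_le s hpair i0 t ht1 ht2
  omega

theorem suffix_drop_eq (arr s : List Int) (hperm : s.Perm arr) (hpair : s.Pairwise (· ≤ ·))
    (j0 : Nat)
    (hbound : ∀ j k, j ≤ k → j0 < k → k < arr.length → arr.getD j 0 ≤ arr.getD k 0) :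
    ∀ t k, k = arr.length - t → j0 < k → arr.drop k = s.drop k := by
  have hslen : s.length = arr.length := hperm.length_eq
  intro t
  induction t with
  | zero =>
      intro k hk _
      have : k = arr.length := by omega
      subst this
      rw [List.drop_eq_nil_of_le (by omega), List.drop_eq_nil_of_le (by omega)]
  | succ t ih =>
      intro k hk hj0
      by_cases hlen : arr.length ≤ k
      · rw [List.drop_eq_nil_of_le hlen, List.drop_eq_nil_of_le (by omega)]
      rw [not_le] at hlen
      have hnext : arr.drop (k+1) = s.drop (k+1) := by
        rcases Nat.lt_or_ge (k+1) (arr.length - t) with hc | hc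
        · -- k+1 still = arr.length - t maybe not; handle via ih with equality
          omega
        · rcases Nat.eq_or_lt_of_le hc with heq | hgt
          · exact ih (k+1) heq.symm (by omega)
          · rw [List.drop_eq_nil_of_le (by omega), List.drop_eq_nil_of_le (by omega)]
      have ht : (s.take (k+1)).Perm (arr.take (k+1)) := take_perm_of_drop_eq arr s hperm (k+1) hnext
      have hak : arr.getD k 0 ∈ arr.take (k+1) :=
        (mem_take_iff' _ _ _).mpr ⟨k, by omega, hlen, rfl⟩
      have hsk : s.getD k 0 ∈ s.take (k+1) :=
        (mem_take_iff' _ _ _).mpr ⟨k, by omega, by omega, rfl⟩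
      have a_max : ∀ x ∈ arr.take (k+1), x ≤ arr.getD k 0 := by
        intro x hx
        obtain ⟨j, hjk, hjlen, rfl⟩ := (mem_take_iff' _ _ _).mp hx
        exact hbound j k (by omega) hj0 hlen
      have s_max : ∀ x ∈ s.take (k+1), x ≤ s.getD k 0 := by
        intro x hx
        obtain ⟨j, hjk, hjlen, rfl⟩ := (mem_take_iff' _ _ _).mp hx
        exact pairwise_getD_le s hpair j k (by omega) (by omega)
      have heq : arr.getD k 0 = s.getD k 0 :=
        le_antisymm (s_max _ (ht.symm.mem_iff.mp hak)) (a_max _ (ht.mem_iff.mp hsk))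
      rw [List.drop_eq_getElem_cons hlen, List.drop_eq_getElem_cons (by omega : k < s.length)]
      rw [hnext]
      congr 1
      rw [← List.getD_eq_getElem arr 0 hlen, ← List.getD_eq_getElem s 0 (by omega), heq]

theorem s_gt_at (arr s : List Int) (hperm : s.Perm arr) (hpair : s.Pairwise (· ≤ ·))
    (j0 : Nat) (hsuf : arr.drop (j0+1) = s.drop (j0+1)) (hj0 : j0 < arr.length)
    (hwit : ∃ j, j < j0 ∧ arr.getD j0 0 < arr.getD j 0) :
    arr.getD j0 0 < s.getD j0 0 := by
  have hslen : s.length = arr.length := hperm.length_eq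
  obtain ⟨j, hij, hjgt⟩ := hwit
  have ht : (s.take (j0+1)).Perm (arr.take (j0+1)) := take_perm_of_drop_eq arr s hperm (j0+1) hsuf
  have hw : arr.getD j 0 ∈ s.take (j0+1) :=
    ht.mem_iff.mpr ((mem_take_iff' _ _ _).mpr ⟨j, by omega, by omega, rfl⟩)
  have : arr.getD j 0 ≤ s.getD j0 0 := by
    obtain ⟨t, ht1, ht2, heq⟩ := (mem_take_iff' _ _ _).mp hw
    rw [heq]
    exact pairwise_getD_le s hpair t j0 (by omega) (by omega)
  omega

theorem mem_take_getElem {α : Type} (l : List α) (k : Nat) (a : α) (h : a ∈ l.take k) :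
    ∃ j, ∃ hj : j < l.length, j < k ∧ a = l[j] := by
  rw [List.mem_iff_getElem] at h
  obtain ⟨i, hi, rfl⟩ := h
  have h2 : i < min k l.length := by simpa using hi
  exact ⟨i, by omega, by omega, by rw [List.getElem_take]⟩

theorem mem_drop_getElem {α : Type} (l : List α) (k : Nat) (a : α) (h : a ∈ l.drop k) :
    ∃ j, ∃ hj : j < l.length, k ≤ j ∧ a = l[j] := by
  rw [List.mem_iff_getElem] at h
  obtain ⟨i, hi, rfl⟩ := h
  have h2 : k + i < l.length := by
    have := List.length_drop (l := l) (i := k); omega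
  exact ⟨k + i, h2, by omega, by rw [List.getElem_drop]⟩

theorem enum_zip_getElem (arr s : List Int) (hslen : s.length = arr.length) (k : Nat)
    (hk : k < (PySem.List.enumerate (arr.zip s) 0).length) (hk' : k < arr.length) :
    (PySem.List.enumerate (arr.zip s) 0)[k] = ((k : Int), (arr.getD k 0, s.getD k 0)) := by
  rw [PySem.List.getElem_enumerate]
  rw [List.getElem_zip]
  rw [← List.getD_eq_getElem arr 0 hk', ← List.getD_eq_getElem s 0 (by omega)]
  simp

theorem enum_zip_length (arr s : List Int) (hslen : s.length = arr.length) :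
    (PySem.List.enumerate (arr.zip s) 0).length = arr.length := by
  rw [PySem.List.length_enumerate, List.length_zip, hslen]
  omega

theorem filter_enum_head (arr s : List Int) (hslen : s.length = arr.length) (i0 : Nat)
    (hi0 : i0 < arr.length)
    (hpref : ∀ k, k < i0 → arr.getD k 0 = s.getD k 0)
    (hne : arr.getD i0 0 ≠ s.getD i0 0) :
    (PySem.List.enumerate (arr.zip s) 0).filter (fun p => p.2.1 != p.2.2)
      = ((i0 : Int), (arr.getD i0 0, s.getD i0 0)) ::
        ((PySem.List.enumerate (arr.zip s) 0).drop (i0+1)).filter (fun p => p.2.1 != p.2.2) := by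
  have hElen := enum_zip_length arr s hslen
  conv_lhs => rw [← List.take_append_drop i0 (PySem.List.enumerate (arr.zip s) 0)]
  rw [List.filter_append]
  have h1 : (List.take i0 (PySem.List.enumerate (arr.zip s) 0)).filter (fun p => p.2.1 != p.2.2) = [] := by
    rw [List.filter_eq_nil_iff]
    intro a ha
    obtain ⟨j, hj, hjk, rfl⟩ := mem_take_getElem _ _ _ ha
    rw [enum_zip_getElem arr s hslen j hj (by omega)]
    simp only [bne_iff_ne, ne_eq, Decidable.not_not]
    exact hpref j hjk
  rw [h1, List.nil_append]
  rw [List.drop_eq_getElem_cons (by omega : i0 < (PySem.List.enumerate (arr.zip s) 0).length)]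
  rw [List.filter_cons]
  rw [enum_zip_getElem arr s hslen i0 (by omega) hi0]
  simp only [bne_iff_ne, ne_eq, hne, not_false_eq_true, if_true]

theorem filter_enum_last (arr s : List Int) (hslen : s.length = arr.length) (j0 : Nat)
    (hj0 : j0 < arr.length)
    (hsuf : ∀ k, j0 < k → k < arr.length → arr.getD k 0 = s.getD k 0)
    (hne : arr.getD j0 0 ≠ s.getD j0 0) :
    (PySem.List.enumerate (arr.zip s) 0).filter (fun p => p.2.1 != p.2.2)
      = ((PySem.List.enumerate (arr.zip s) 0).take j0).filter (fun p => p.2.1 != p.2.2)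
        ++ [((j0 : Int), (arr.getD j0 0, s.getD j0 0))] := by
  have hElen := enum_zip_length arr s hslen
  conv_lhs => rw [← List.take_append_drop (j0+1) (PySem.List.enumerate (arr.zip s) 0)]
  rw [List.filter_append]
  have h1 : (List.drop (j0+1) (PySem.List.enumerate (arr.zip s) 0)).filter (fun p => p.2.1 != p.2.2) = [] := by
    rw [List.filter_eq_nil_iff]
    intro a ha
    obtain ⟨j, hj, hjk, rfl⟩ := mem_drop_getElem _ _ _ ha
    rw [enum_zip_getElem arr s hslen j hj (by omega)]
    simp only [bne_iff_ne, ne_eq, Decidable.not_not]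
    exact hsuf j (by omega) (by omega)
  rw [h1, List.append_nil]
  rw [List.take_add_one, List.getElem?_eq_getElem (by omega : j0 < (PySem.List.enumerate (arr.zip s) 0).length)]
  rw [List.filter_append]
  rw [enum_zip_getElem arr s hslen j0 (by omega) hj0]
  simp only [Option.toList_some, List.filter_cons, List.filter_nil]
  simp only [bne_iff_ne, ne_eq, hne, not_false_eq_true, if_true]

theorem getD_eq_of_take_eq (u v : List Int) (i0 k : Nat) (h : u.take i0 = v.take i0)
    (hk : k < i0) (hku : k < u.length) : u.getD k 0 = v.getD k 0 := by
  have hlen : (u.take i0).length = (v.take i0).length := by rw [h]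
  simp only [List.length_take] at hlen
  have hkv : k < v.length := by omega
  rw [List.getD_eq_getElem _ _ hku, List.getD_eq_getElem _ _ hkv]
  have h2 : (u.take i0)[k]'(by simp; omega) = (v.take i0)[k]'(by simp; omega) := by
    simp only [h]
  simpa using h2

-- sorted input: alt returns (0, 0)

theorem getD_eq_of_drop_eq (u v : List Int) (k : Nat) (h : u.drop k = v.drop k)
    (hku : k < u.length) (hkv : k < v.length) : u.getD k 0 = v.getD k 0 := by
  rw [List.getD_eq_getElem _ _ hku, List.getD_eq_getElem _ _ hkv]
  have h2 : (u.drop k)[0]'(by simp; omega) = (v.drop k)[0]'(by simp; omega) := by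
    simp only [h]
  simpa using h2

theorem alt_of_sorted (arr : List Int)
    (hchain : ∀ k, k + 1 < arr.length → arr.getD k 0 ≤ arr.getD (k+1) 0) :
    find_unsorted_window_alt arr = (0, 0) := by
  have hpw : arr.Pairwise (· ≤ ·) := by
    apply List.IsChain.pairwise
    rw [List.isChain_iff_getElem]
    intro i hi
    have := hchain i hi
    rwa [List.getD_eq_getElem _ _ (by omega), List.getD_eq_getElem _ _ (by omega)] at this
  have hs : PySem.List.sorted arr (fun x => x) false = arr :=
    PySem.List.sorted_eq_self_of_pairwise arr (fun x => x) (by simpa using hpw)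
  simp only [find_unsorted_window_alt, hs]
  have hfil : (List.filter (fun p => p.2.1 != p.2.2) (PySem.List.enumerate (arr.zip arr) 0)) = [] := by
    rw [List.filter_eq_nil_iff]
    intro a ha
    rw [PySem.List.mem_enumerate_iff] at ha
    obtain ⟨k, hk, rfl⟩ := ha
    simp [List.getElem_zip]
  rw [hfil]
  rfl

theorem main_eq (arr : List Int) : find_unsorted_window arr = find_unsorted_window_alt arr := by
  by_cases hn1 : arr.length ≤ 1
  · rw [alt_of_sorted arr (by intro k hk; omega)]
    simp [find_unsorted_window, hn1]
  rw [not_le] at hn1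
  by_cases hL : pvScanLeft arr 0 = arr.length - 1
  · rw [alt_of_sorted arr (by
      intro k hk
      exact scanLeft_chain arr 0 k (by omega) (by omega))]
    simp [find_unsorted_window, hL]
  -- unsorted case
  set n := arr.length with hn
  set L := pvScanLeft arr 0 with hLdef
  set R := pvScanRight arr (n - 1) with hRdef
  have hLle : L ≤ n - 1 := scanLeft_le arr 0 (by omega)
  have hLlt : L < n - 1 := by omega
  have hstopL : ¬ arr.getD L 0 ≤ arr.getD (L+1) 0 := scanLeft_stop arr 0 hLlt
  have hRle : R ≤ n - 1 := scanRight_le arr (n - 1)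
  have chainR : ∀ k, R ≤ k → k < n - 1 → arr.getD k 0 ≤ arr.getD (k+1) 0 := by
    intro k h1 h2; exact scanRight_chain arr (n-1) k h1 (by omega)
  have hLR : L < R := by
    by_contra hc
    rw [not_lt] at hc
    exact hstopL (chainR L hc hLlt)
  have chainL : ∀ k, k < L → arr.getD k 0 ≤ arr.getD (k+1) 0 := by
    intro k h1; exact scanLeft_chain arr 0 k (by omega) h1
  have premono : ∀ i j, i ≤ j → j ≤ L → arr.getD i 0 ≤ arr.getD j 0 := by
    intro i j h1 h2
    exact mono_of_chain (fun k => arr.getD k 0) 0 L (fun k _ hk => chainL k hk) i j (by omega) h1 h2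
  have tailmono : ∀ i j, R ≤ i → i ≤ j → j ≤ n - 1 → arr.getD i 0 ≤ arr.getD j 0 := by
    intro i j h1 h2 h3
    exact mono_of_chain (fun k => arr.getD k 0) R (n-1) chainR i j h1 h2 h3
  -- the window min and max
  set W := PySem.List.slice arr (some (L : Int)) (some ((R : Int) + 1)) with hWdef
  have hWmem : ∀ x, x ∈ W ↔ ∃ k, L ≤ k ∧ k ≤ R ∧ x = arr.getD k 0 := by
    intro x; exact mem_window_iff arr L R (by omega) x
  have hWne : arr.getD L 0 ∈ W := (hWmem _).mpr ⟨L, le_refl _, by omega, rfl⟩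
  obtain ⟨m, hm⟩ : ∃ m, PySem.List.min? W (fun x => x) = some m := by
    cases hmin : PySem.List.min? W (fun x => x) with
    | none =>
        rw [PySem.List.min?_eq_none_iff] at hmin
        rw [hmin] at hWne
        exact absurd hWne (List.not_mem_nil)
    | some m => exact ⟨m, rfl⟩
  obtain ⟨M, hM⟩ : ∃ M, PySem.List.max? W (fun x => x) = some M := by
    cases hmax : PySem.List.max? W (fun x => x) with
    | none =>
        rw [PySem.List.max?_eq_none_iff] at hmax
        rw [hmax] at hWne
        exact absurd hWne (List.not_mem_nil)
    | some M => exact ⟨M, rfl⟩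
  obtain ⟨tm, htm1, htm2, htm3⟩ : ∃ k, L ≤ k ∧ k ≤ R ∧ m = arr.getD k 0 :=
    (hWmem m).mp (PySem.List.min?_mem hm)
  obtain ⟨tM, htM1, htM2, htM3⟩ : ∃ k, L ≤ k ∧ k ≤ R ∧ M = arr.getD k 0 :=
    (hWmem M).mp (PySem.List.max?_mem hM)
  have hm_min : ∀ k, L ≤ k → k ≤ R → m ≤ arr.getD k 0 := by
    intro k h1 h2
    exact PySem.List.min?_isMin hm _ ((hWmem _).mpr ⟨k, h1, h2, rfl⟩)
  have hM_max : ∀ k, L ≤ k → k ≤ R → arr.getD k 0 ≤ M := by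
    intro k h1 h2
    exact PySem.List.max?_isMax hM _ ((hWmem _).mpr ⟨k, h1, h2, rfl⟩)
  set i0 := pvExpandLeft arr m L with hi0def
  set j0 := pvExpandRight arr M R with hj0def
  have hi0le : i0 ≤ L := expandLeft_le arr m L
  have hj0ge : R ≤ j0 := expandRight_ge arr M R
  have hj0le : j0 ≤ n - 1 := expandRight_le arr M R (by omega)
  -- sorted copy
  set s := PySem.List.sorted arr (fun x => x) false with hsdef
  have hperm : s.Perm arr := PySem.List.sorted_perm arr (fun x => x) false
  have hpair : s.Pairwise (· ≤ ·) := by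
    have := PySem.List.sorted_pairwise arr (fun x => x)
    simpa using this
  have hslen : s.length = arr.length := hperm.length_eq
  -- prefix bound and prefix equality
  have hbound : ∀ k j, k < i0 → k ≤ j → j < n → arr.getD k 0 ≤ arr.getD j 0 := by
    intro k j hk hkj hj
    have hkm : arr.getD k 0 ≤ m := by
      have h1 : arr.getD k 0 ≤ arr.getD (i0 - 1) 0 := premono k (i0-1) (by omega) (by omega)
      have h2 : arr.getD (i0 - 1) 0 ≤ m := expandLeft_stop arr m L (by omega)
      omega
    by_cases hc : j ≤ L
    · exact premono k j hkj hc
    rw [not_le] at hc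
    by_cases hc2 : j ≤ R
    · have := hm_min j (by omega) hc2; omega
    · have h3 : m ≤ arr.getD R 0 := hm_min R (by omega) (le_refl _)
      have h4 : arr.getD R 0 ≤ arr.getD j 0 := tailmono R j (le_refl _) (by omega) (by omega)
      omega
  have hpref_take : arr.take i0 = s.take i0 :=
    prefix_take_eq arr s hperm hpair i0 hbound i0 (le_refl _) (by omega)
  have hpref : ∀ k, k < i0 → arr.getD k 0 = s.getD k 0 := by
    intro k hk
    exact getD_eq_of_take_eq arr s i0 k hpref_take hk (by omega)
  have hwitL : ∃ j, i0 < j ∧ j < n ∧ arr.getD j 0 < arr.getD i0 0 := by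
    rcases Nat.eq_or_lt_of_le hi0le with heq | hlt
    · exact ⟨L + 1, by omega, by omega, by rw [heq]; omega⟩
    · have h1 : m < arr.getD i0 0 := expandLeft_strict arr m L i0 (le_refl _) hlt
      exact ⟨tm, by omega, by omega, by rw [← htm3]; exact h1⟩
  have hne_i0 : s.getD i0 0 < arr.getD i0 0 :=
    s_lt_at arr s hperm hpair i0 hpref_take (by omega) hwitL
  -- suffix bound and suffix equality
  have hbound' : ∀ j k, j ≤ k → j0 < k → k < n → arr.getD j 0 ≤ arr.getD k 0 := by
    intro j k hjk hj0k hk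
    have hMk : M ≤ arr.getD k 0 := by
      have h1 : M ≤ arr.getD (j0 + 1) 0 := expandRight_stop arr M R (by omega)
      have h2 : arr.getD (j0 + 1) 0 ≤ arr.getD k 0 := tailmono (j0+1) k (by omega) (by omega) (by omega)
      omega
    by_cases hc : j ≤ R
    · by_cases hc2 : j ≤ L
      · have h3 : arr.getD j 0 ≤ arr.getD L 0 := premono j L hc2 (le_refl _)
        have h4 : arr.getD L 0 ≤ M := hM_max L (le_refl _) (by omega)
        omega
      · rw [not_le] at hc2
        have := hM_max j (by omega) hc; omega
    · rw [not_le] at hc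
      exact tailmono j k (by omega) hjk (by omega)
  have hsuf_drop : ∀ k, j0 < k → k ≤ n → arr.drop k = s.drop k := by
    intro k hk1 hk2
    exact suffix_drop_eq arr s hperm hpair j0 hbound' (n - k) k (by omega) hk1
  have hsuf : ∀ k, j0 < k → k < n → arr.getD k 0 = s.getD k 0 := by
    intro k hk1 hk2
    exact getD_eq_of_drop_eq arr s k (hsuf_drop k hk1 (by omega)) (by omega) (by omega)
  have hwitR : ∃ j, j < j0 ∧ arr.getD j0 0 < arr.getD j 0 := by
    rcases Nat.eq_or_lt_of_le hj0ge with heq | hlt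
    · refine ⟨R - 1, by omega, ?_⟩
      have h7 := scanRight_stop arr (n-1) (by omega : 0 < R)
      rw [← hRdef] at h7
      rw [← heq]
      omega
    · have h1 : arr.getD j0 0 < M := expandRight_strict arr M R j0 hlt (le_refl _)
      exact ⟨tM, by omega, by rw [← htM3]; exact h1⟩
  have hne_j0 : arr.getD j0 0 < s.getD j0 0 :=
    s_gt_at arr s hperm hpair j0 (hsuf_drop (j0+1) (by omega) (by omega)) (by omega) hwitR
  -- A's value
  have hA : find_unsorted_window arr = ((i0 : Int), (j0 : Int)) := by
    rw [find_unsorted_window]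
    rw [if_neg (by omega : ¬ arr.length ≤ 1)]
    rw [if_neg (by rw [← hLdef, ← hn]; omega : ¬ pvScanLeft arr 0 = arr.length - 1)]
    show (((pvExpandLeft arr ((PySem.List.min? W (fun x => x)).getD 0) L : Nat) : Int),
          ((pvExpandRight arr ((PySem.List.max? W (fun x => x)).getD 0) R : Nat) : Int)) = ((i0 : Int), (j0 : Int))
    rw [hm, hM]
    rfl
  -- B's value
  obtain ⟨tl, htl⟩ : ∃ tl,
      (((PySem.List.enumerate (arr.zip s) 0).filter (fun p => p.2.1 != p.2.2)).map (fun p => p.1))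
        = ((i0 : Int)) :: tl := by
    rw [filter_enum_head arr s hslen i0 (by omega) hpref (by omega)]
    exact ⟨_, by rw [List.map_cons]⟩
  have hlast : (((i0 : Int)) :: tl).getLast (by simp) = (j0 : Int) := by
    have h6 : ((((PySem.List.enumerate (arr.zip s) 0).filter (fun p => p.2.1 != p.2.2)).map (fun p => p.1))).getLast? = some (j0 : Int) := by
      rw [filter_enum_last arr s hslen j0 (by omega) hsuf (by omega)]
      rw [List.map_append]
      simp
    rw [htl] at h6
    have hne : ((i0 : Int)) :: tl ≠ [] := List.cons_ne_nil _ _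
    rw [List.getLast?_eq_some_getLast hne] at h6
    exact Option.some.inj h6
  have hB : find_unsorted_window_alt arr = ((i0 : Int), (j0 : Int)) := by
    rw [find_unsorted_window_alt]
    rw [← hsdef]
    rw [htl]
    show ((i0 : Int), (((i0 : Int)) :: tl).getLast (by simp)) = ((i0 : Int), (j0 : Int))
    rw [hlast]
  rw [hA, hB]

-- ===== VERDICT (by name: the statement is the Claim_ definition above) =====
theorem find_unsorted_window_spec : Claim_equal_find_unsorted_window := by
  intro arr _hdom
  show find_unsorted_window arr = find_unsorted_window_alt arr
  exact main_eq arr
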